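-- pv_equiv track=rewrite | github.com/TiffL/advent-of-code | 2024/day-3/part-2.py | parse_do_donts
-- ===== SOURCE A (Python) =====
-- def parse_do_donts(puzzle):
--     process_spans = []
--
--     is_instruction_enabled = True
--     i = 0
--
--     while i != -1 and i < len(puzzle):
--         search_phrase = "don't()" if is_instruction_enabled else "do()"
--
--         if is_instruction_enabled:
--             end = puzzle.find(search_phrase, i+1)
--             process_spans.append((i, len(puzzle) if end == -1 else end))
--             i = end
--         else:
--             i = puzzle.find(search_phrase, i+1)
--
--         is_instruction_enabled = not is_instruction_enabled
--
--     return process_spans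
-- ===== SOURCE B (Python) =====
-- def parse_do_donts(puzzle):
--     # One left-to-right scan over every position with an enabled flag;
--     # spans are emitted marker-start to marker-start and never empty.
--     spans = []
--     enabled = True
--     start = 0
--     for i in range(len(puzzle)):
--         if enabled:
--             if puzzle.startswith("don't()", i):
--                 if start < i:
--                     spans.append((start, i))
--                 enabled = False
--         elif puzzle.startswith("do()", i):
--             start = i
--             enabled = True
--     if enabled and start < len(puzzle):
--         spans.append((start, len(puzzle)))
--     return spans
-- ===== Notes on version B (the rewrite author's own statement) =====
-- stated objective: alternative
-- what changed: B replaces A's find()-and-jump while-loop (alternating searches for don't()/do() that restart from the last hit) by a single left-to-right scan over every position with an enabled flag and a span start, emitting only non-empty spans.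
-- intended difference: On puzzles that start with "don't()" A searches for the first don't() only from index 1, so it skips the marker at position 0 and returns an initial span (0, end-of-next-region) as if the prefix were enabled, e.g. [(0,7)] on "don't()"; B sees the marker at 0, starts disabled and returns no such span ([] on "don't()"), which is the intended reading of a leading don't(). — e.g. on parse_do_donts("don't()"): A returns [(0, 7)], B returns []
import Mathlib
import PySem

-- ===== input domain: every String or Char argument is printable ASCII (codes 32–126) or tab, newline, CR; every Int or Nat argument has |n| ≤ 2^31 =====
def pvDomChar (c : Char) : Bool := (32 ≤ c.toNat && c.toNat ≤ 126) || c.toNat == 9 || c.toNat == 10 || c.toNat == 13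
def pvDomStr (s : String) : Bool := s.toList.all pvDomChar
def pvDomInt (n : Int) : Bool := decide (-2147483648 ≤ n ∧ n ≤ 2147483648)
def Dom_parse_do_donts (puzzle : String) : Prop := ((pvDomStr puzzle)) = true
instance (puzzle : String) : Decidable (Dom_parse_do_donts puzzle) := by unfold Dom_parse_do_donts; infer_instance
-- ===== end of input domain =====

-- B is an alternative single left-to-right scan with an enabled flag (never emitting empty
-- spans) instead of A's find()-and-jump loop; on puzzles starting with "don't()" A skips that
-- marker (its find starts at index 1) while B honours it — the intended difference D_ below.

-- the two marker literals (shared by both ports)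
def pvDont : List Char := "don't()".toList
def pvDoo : List Char := "do()".toList

-- ===== PORT A =====
-- the while-loop of A; fuel s.length + 1 suffices because i strictly increases every
-- iteration (a guard making the recursion total, shown never to run out by pv_main below)
def pvALoop (s : List Char) : Nat → Int → Bool → List (Int × Int) → List (Int × Int)
  | 0, _, _, spans => spans
  | f+1, i, en, spans =>
    if i ≠ -1 ∧ i < (s.length : Int) then
      if en then
        -- end = puzzle.find("don't()", i+1); append (i, len if end == -1 else end); i = end
        let e := PySem.Chars.findFrom s pvDont (i + 1) none
        pvALoop s f e false (spans ++ [(i, if e = -1 then (s.length : Int) else e)])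
      else
        -- i = puzzle.find("do()", i+1)
        pvALoop s f (PySem.Chars.findFrom s pvDoo (i + 1) none) true spans
    else spans

def parse_do_donts (puzzle : String) : List (Int × Int) :=
  pvALoop puzzle.toList (puzzle.toList.length + 1) 0 true []

-- ===== PORT B =====
-- one loop step of Source B; puzzle.startswith(sub, i) is ported as a prefix test on s.drop i.toNat,
-- exact here because i comes from range(len(puzzle)) and is nonnegative
def pvBStep (s : List Char) (acc : List (Int × Int) × Bool × Int) (i : Int) :
    List (Int × Int) × Bool × Int :=
  if acc.2.1 then
    if PySem.Chars.startswith (s.drop i.toNat) pvDont then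
      ((if acc.2.2 < i then acc.1 ++ [(acc.2.2, i)] else acc.1), false, acc.2.2)
    else acc
  else if PySem.Chars.startswith (s.drop i.toNat) pvDoo then (acc.1, true, i)
  else acc

def parse_do_donts_alt (puzzle : String) : List (Int × Int) :=
  let s := puzzle.toList
  let r := (PySem.List.pyRange 0 (s.length : Int) 1).foldl (pvBStep s) ([], true, 0)
  if r.2.1 ∧ r.2.2 < (s.length : Int) then r.1 ++ [(r.2.2, (s.length : Int))] else r.1

-- ===== PRECONDITION & SPEC =====
-- On puzzles starting with "don't()" A skips the marker at position 0 (its find starts at index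
-- 1) and returns a span pretending the prefix is enabled (e.g. [(0,7)] on "don't()"); B starts
-- disabled there and returns no such span ([] on "don't()"), the intended reading.
def D_parse_do_donts (puzzle : String) : Prop :=
  PySem.Str.startswith puzzle "don't()" = true
instance (puzzle : String) : Decidable (D_parse_do_donts puzzle) := by
  unfold D_parse_do_donts; infer_instance

def Spec_parse_do_donts (puzzle : String) (out : List (Int × Int)) : Prop :=
  ¬ D_parse_do_donts puzzle → out = parse_do_donts_alt puzzle
instance (puzzle : String) (out : List (Int × Int)) : Decidable (Spec_parse_do_donts puzzle out) := by
  unfold Spec_parse_do_donts; infer_instance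

def pvDiffWitness_parse_do_donts : String := "don't()"
def pvDiffWitnessOut_parse_do_donts : (List (Int × Int)) × (List (Int × Int)) :=
  ([(0, 7)], [])

-- ===== CLAIM (what is proved, stated in full; the proofs are below) =====
def Claim_unchanged_parse_do_donts : Prop :=
  ∀ (puzzle : String), Dom_parse_do_donts puzzle →
    Spec_parse_do_donts puzzle (parse_do_donts puzzle)
def Claim_changed_parse_do_donts : Prop :=
  Dom_parse_do_donts (pvDiffWitness_parse_do_donts) ∧
  D_parse_do_donts (pvDiffWitness_parse_do_donts) ∧
  parse_do_donts (pvDiffWitness_parse_do_donts) = pvDiffWitnessOut_parse_do_donts.1 ∧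
  parse_do_donts_alt (pvDiffWitness_parse_do_donts) = pvDiffWitnessOut_parse_do_donts.2 ∧
  pvDiffWitnessOut_parse_do_donts.1 ≠ pvDiffWitnessOut_parse_do_donts.2
def Claim_exact_parse_do_donts : Prop :=
  ∀ (puzzle : String), Dom_parse_do_donts puzzle → D_parse_do_donts puzzle →
    parse_do_donts puzzle ≠ parse_do_donts_alt puzzle

-- ===== LEMMAS AND PROOFS =====

-- recursive restatement of B's scan (the fold of the port is bridged to it in pv_bridge)
def pvBScan (s : List Char) (p : Nat) (en : Bool) (st : Int) : List (Int × Int) :=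
  if p < s.length then
    if en then
      if PySem.Chars.startswith (s.drop p) pvDont then
        (if st < (p : Int) then [(st, (p : Int))] else []) ++ pvBScan s (p+1) false st
      else pvBScan s (p+1) true st
    else if PySem.Chars.startswith (s.drop p) pvDoo then pvBScan s (p+1) true (p : Int)
    else pvBScan s (p+1) false st
  else if en ∧ st < (s.length : Int) then [(st, (s.length : Int))] else []
termination_by s.length - p

theorem pv_bridge (s : List Char) (p : Nat) (hp : p ≤ s.length)
    (spans : List (Int × Int)) (en : Bool) (st : Int) :
    (let r := (PySem.List.pyRange (p : Int) (s.length : Int) 1).foldl (pvBStep s) (spans, en, st)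
     if r.2.1 ∧ r.2.2 < (s.length : Int) then r.1 ++ [(r.2.2, (s.length : Int))] else r.1)
      = spans ++ pvBScan s p en st := by
  rcases Nat.eq_or_lt_of_le hp with rfl | hlt
  · rw [pvBScan]
    simp only [lt_irrefl, if_false]
    rw [show PySem.List.pyRange ((s.length : Int)) ((s.length : Int)) 1 = [] by
      simp [PySem.List.pyRange]]
    simp only [List.foldl_nil]
    split_ifs <;> simp
  · rw [pvBScan, if_pos hlt]
    rw [PySem.List.pyRange_one_cons (by exact_mod_cast hlt)]
    simp only [List.foldl_cons]
    have hcast : ((p : Int) + 1) = ((p + 1 : Nat) : Int) := by push_cast; ring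
    cases en with
    | true =>
      by_cases hsw : PySem.Chars.startswith (s.drop p) pvDont = true
      · rw [show pvBStep s (spans, true, st) (p : Int)
              = ((if st < (p:Int) then spans ++ [(st, (p:Int))] else spans), false, st) by
            simp [pvBStep, hsw]]
        rw [hcast, pv_bridge s (p+1) (by omega)]
        simp only [hsw]
        split_ifs <;> simp
      · rw [show pvBStep s (spans, true, st) (p : Int) = (spans, true, st) by
            simp [pvBStep, hsw]]
        rw [hcast, pv_bridge s (p+1) (by omega)]
        simp [hsw]
    | false =>
      by_cases hsw : PySem.Chars.startswith (s.drop p) pvDoo = true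
      · rw [show pvBStep s (spans, false, st) (p : Int) = (spans, true, (p:Int)) by
            simp [pvBStep, hsw]]
        rw [hcast, pv_bridge s (p+1) (by omega)]
        simp [hsw]
      · rw [show pvBStep s (spans, false, st) (p : Int) = (spans, false, st) by
            simp [pvBStep, hsw]]
        rw [hcast, pv_bridge s (p+1) (by omega)]
        simp [hsw]
termination_by s.length - p

theorem pv_alt_eq_scan (puzzle : String) :
    parse_do_donts_alt puzzle = pvBScan puzzle.toList 0 true 0 := by
  have h := pv_bridge puzzle.toList 0 (Nat.zero_le _) [] true 0
  simp only [Nat.cast_zero, List.nil_append] at h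
  exact h

-- "sub does not occur in s at or after k", converted from the infix form of findFrom's lemmas
theorem pv_no_occ (s sub : List Char) (k : Nat) :
    ¬ sub <:+: s.drop k ↔ ∀ j, k ≤ j → ¬ sub <+: s.drop j := by
  constructor
  · intro h j hkj hpre
    apply h
    rw [← PySem.Chars.isIn_iff_infix, ← PySem.Chars.exists_prefix_drop_iff_isIn]
    exact ⟨j - k, by rwa [List.drop_drop, Nat.add_sub_cancel' hkj]⟩
  · intro h hinf
    rw [← PySem.Chars.isIn_iff_infix, ← PySem.Chars.exists_prefix_drop_iff_isIn] at hinf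
    obtain ⟨m, hm⟩ := hinf
    rw [List.drop_drop] at hm
    exact h (k + m) (by omega) hm

theorem pv_aLoop_stop (s : List Char) (f : Nat) (en : Bool) (spans : List (Int × Int)) :
    pvALoop s f (-1) en spans = spans := by
  cases f <;> simp [pvALoop]

-- enabled scan, no don't() ahead: one final span
theorem pv_scan_true_none (s : List Char) (p : Nat) (st : Int)
    (h : ∀ j, p ≤ j → ¬ pvDont <+: s.drop j) :
    pvBScan s p true st = if st < (s.length : Int) then [(st, (s.length : Int))] else [] := by
  rw [pvBScan]
  by_cases hp : p < s.length
  · have h0 : ¬ pvDont <+: s.drop p := h p le_rfl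
    have hsw : PySem.Chars.startswith (s.drop p) pvDont = false := by
      rw [Bool.eq_false_iff]; simp only [ne_eq, PySem.Chars.startswith_iff]; exact h0
    rw [if_pos hp, if_pos rfl, hsw]
    simp only [Bool.false_eq_true, if_false]
    exact pv_scan_true_none s (p+1) st (fun j hj => h j (by omega))
  · rw [if_neg hp]
    simp
termination_by s.length - p

-- enabled scan, first don't() at e: emit (st, e) and continue disabled
theorem pv_scan_true_first (s : List Char) (p e : Nat) (st : Int)
    (hpe : p ≤ e) (he : pvDont <+: s.drop e)
    (hmin : ∀ j, p ≤ j → j < e → ¬ pvDont <+: s.drop j) (hst : st < (p : Int)) :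
    pvBScan s p true st = (st, (e : Int)) :: pvBScan s (e+1) false st := by
  have hen : e < s.length := by
    have := he.length_le
    simp [pvDont] at this
    omega
  rw [pvBScan]
  rcases Nat.eq_or_lt_of_le hpe with rfl | hlt
  · have hsw : PySem.Chars.startswith (s.drop p) pvDont = true := by
      rw [PySem.Chars.startswith_iff]; exact he
    rw [if_pos hen, if_pos rfl, hsw, if_pos rfl, if_pos hst]
    simp
  · have h0 : ¬ pvDont <+: s.drop p := hmin p le_rfl hlt
    have hsw : PySem.Chars.startswith (s.drop p) pvDont = false := by
      rw [Bool.eq_false_iff]; simp only [ne_eq, PySem.Chars.startswith_iff]; exact h0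
    rw [if_pos (by omega : p < s.length), if_pos rfl, hsw]
    simp only [Bool.false_eq_true, if_false]
    exact pv_scan_true_first s (p+1) e st (by omega) he
      (fun j hj hje => hmin j (by omega) hje) (by push_cast; omega)
termination_by e - p

-- disabled scan, no do() ahead: nothing more is emitted
theorem pv_scan_false_none (s : List Char) (p : Nat) (st : Int)
    (h : ∀ j, p ≤ j → ¬ pvDoo <+: s.drop j) :
    pvBScan s p false st = [] := by
  rw [pvBScan]
  by_cases hp : p < s.length
  · have h0 : ¬ pvDoo <+: s.drop p := h p le_rfl
    have hsw : PySem.Chars.startswith (s.drop p) pvDoo = false := by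
      rw [Bool.eq_false_iff]; simp only [ne_eq, PySem.Chars.startswith_iff]; exact h0
    rw [if_pos hp]
    simp only [Bool.false_eq_true, if_false, hsw]
    exact pv_scan_false_none s (p+1) st (fun j hj => h j (by omega))
  · rw [if_neg hp]
    simp
termination_by s.length - p

-- disabled scan, first do() at d: re-enable with start d
theorem pv_scan_false_first (s : List Char) (p d : Nat) (st : Int)
    (hpd : p ≤ d) (hd : pvDoo <+: s.drop d)
    (hmin : ∀ j, p ≤ j → j < d → ¬ pvDoo <+: s.drop j) :
    pvBScan s p false st = pvBScan s (d+1) true (d : Int) := by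
  have hdn : d < s.length := by
    have := hd.length_le
    simp [pvDoo] at this
    omega
  rw [pvBScan]
  rcases Nat.eq_or_lt_of_le hpd with rfl | hlt
  · have hsw : PySem.Chars.startswith (s.drop p) pvDoo = true := by
      rw [PySem.Chars.startswith_iff]; exact hd
    rw [if_pos hdn]
    simp [hsw]
  · have h0 : ¬ pvDoo <+: s.drop p := hmin p le_rfl hlt
    have hsw : PySem.Chars.startswith (s.drop p) pvDoo = false := by
      rw [Bool.eq_false_iff]; simp only [ne_eq, PySem.Chars.startswith_iff]; exact h0
    rw [if_pos (by omega : p < s.length)]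
    simp only [Bool.false_eq_true, if_false, hsw]
    exact pv_scan_false_first s (p+1) d st (by omega) hd (fun j hj hje => hmin j (by omega) hje)
termination_by d - p

-- the main simulation: A's find-and-jump loop equals B's scan, in both loop states
theorem pv_main (s : List Char) (f : Nat) :
    (∀ (i : Nat) (spans : List (Int × Int)), i < s.length → s.length - i ≤ f →
       pvALoop s f (i : Int) true spans = spans ++ pvBScan s (i+1) true (i : Int)) ∧
    (∀ (e : Nat) (spans : List (Int × Int)) (st : Int), e < s.length → s.length - e ≤ f →
       pvALoop s f (e : Int) false spans = spans ++ pvBScan s (e+1) false st) := by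
  induction f with
  | zero =>
    exact ⟨fun i _ hi hf => absurd hf (by omega), fun e _ _ he hf => absurd hf (by omega)⟩
  | succ f ih =>
    constructor
    · intro i spans hi hf
      simp only [pvALoop]
      rw [if_pos (show ((i : Int) ≠ -1 ∧ (i : Int) < (s.length : Int)) from
        ⟨by omega, by exact_mod_cast hi⟩), if_pos trivial]
      have hcast : ((i : Int) + 1) = ((i + 1 : Nat) : Int) := by push_cast; ring
      rw [hcast]
      have hk : i + 1 ≤ s.length := by omega
      by_cases he : PySem.Chars.findFrom s pvDont ((i + 1 : Nat) : Int) none = -1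
      · rw [he, pv_aLoop_stop]
        rw [pv_scan_true_none s (i+1) (i : Int)
          ((pv_no_occ s pvDont (i+1)).mp
            ((PySem.Chars.findFrom_natCast_eq_neg_one_iff s pvDont (i+1) hk).mp he))]
        rw [if_pos rfl, if_pos (show (i : Int) < (s.length : Int) by exact_mod_cast hi)]
      · obtain ⟨h1, h2, h3⟩ := PySem.Chars.findFrom_natCast_spec s pvDont (i+1) hk he
        set e := PySem.Chars.findFrom s pvDont ((i + 1 : Nat) : Int) none with hedef
        have he0 : (0 : Int) ≤ e := le_trans (by omega) h1
        have heq : e = (e.toNat : Int) := (Int.toNat_of_nonneg he0).symm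
        have hie : i + 1 ≤ e.toNat := by omega
        have hen : e.toNat < s.length := by
          have := h2.length_le
          simp [pvDont] at this
          omega
        rw [if_neg he, heq]
        rw [(ih.2) e.toNat (spans ++ [((i : Int), ((e.toNat : Nat) : Int))]) (i : Int) hen
          (by omega)]
        rw [pv_scan_true_first s (i+1) e.toNat (i : Int) hie h2
          (fun j hj hje => h3 j hj hje) (by push_cast; omega)]
        simp
    · intro e spans st he hf
      simp only [pvALoop]
      rw [if_pos (show ((e : Int) ≠ -1 ∧ (e : Int) < (s.length : Int)) from
        ⟨by omega, by exact_mod_cast he⟩)]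
      simp only [Bool.false_eq_true, if_false]
      have hcast : ((e : Int) + 1) = ((e + 1 : Nat) : Int) := by push_cast; ring
      rw [hcast]
      have hk : e + 1 ≤ s.length := by omega
      by_cases hd : PySem.Chars.findFrom s pvDoo ((e + 1 : Nat) : Int) none = -1
      · rw [hd, pv_aLoop_stop]
        rw [pv_scan_false_none s (e+1) st
          ((pv_no_occ s pvDoo (e+1)).mp
            ((PySem.Chars.findFrom_natCast_eq_neg_one_iff s pvDoo (e+1) hk).mp hd))]
        simp
      · obtain ⟨h1, h2, h3⟩ := PySem.Chars.findFrom_natCast_spec s pvDoo (e+1) hk hd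
        set d := PySem.Chars.findFrom s pvDoo ((e + 1 : Nat) : Int) none with hddef
        have hd0 : (0 : Int) ≤ d := le_trans (by omega) h1
        have hdq : d = (d.toNat : Int) := (Int.toNat_of_nonneg hd0).symm
        have hed : e + 1 ≤ d.toNat := by omega
        have hdn : d.toNat < s.length := by
          have := h2.length_le
          simp [pvDoo] at this
          omega
        rw [hdq, (ih.1) d.toNat spans hdn (by omega)]
        rw [pv_scan_false_first s (e+1) d.toNat st hed h2 (fun j hj hje => h3 j hj hje)]

-- head of an enabled scan whose start lies strictly before the scan position
theorem pv_scan_true_head (s : List Char) (p : Nat) (st : Int)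
    (hst : st < (p : Int)) (hp : p ≤ s.length) :
    ∃ r l, pvBScan s p true st = (st, r) :: l := by
  rw [pvBScan]
  by_cases hlt : p < s.length
  · rw [if_pos hlt, if_pos rfl]
    by_cases hsw : PySem.Chars.startswith (s.drop p) pvDont = true
    · rw [hsw, if_pos rfl, if_pos hst]
      exact ⟨(p : Int), _, rfl⟩
    · rw [Bool.eq_false_iff.mpr hsw]
      simp only [Bool.false_eq_true, if_false]
      exact pv_scan_true_head s (p+1) st (by push_cast at hst ⊢; omega) (by omega)
  · have hpe : p = s.length := Nat.le_antisymm hp (by omega)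
    rw [if_neg hlt, if_pos ⟨rfl, by rw [← hpe]; exact hst⟩]
    exact ⟨(s.length : Int), [], rfl⟩
termination_by s.length - p

-- every span emitted from position ≥ 1 (start ≥ 1 when enabled) has first coordinate ≥ 1
theorem pv_scan_fst_pos (s : List Char) (p : Nat) (en : Bool) (st : Int)
    (hen : en = true → 1 ≤ st) (hp : 1 ≤ p) :
    ∀ x ∈ pvBScan s p en st, 1 ≤ x.1 := by
  intro x hx
  rw [pvBScan] at hx
  by_cases hlt : p < s.length
  · rw [if_pos hlt] at hx
    cases en with
    | true =>
      rw [if_pos rfl] at hx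
      by_cases hsw : PySem.Chars.startswith (s.drop p) pvDont = true
      · rw [hsw, if_pos rfl] at hx
        rcases List.mem_append.mp hx with hx1 | hx2
        · have : x = (st, (p : Int)) := by
            by_cases hg : st < (p : Int)
            · rw [if_pos hg] at hx1; simpa using hx1
            · rw [if_neg hg] at hx1; simp at hx1
          rw [this]
          exact hen rfl
        · exact pv_scan_fst_pos s (p+1) false st (by simp) (by omega) x hx2
      · rw [Bool.eq_false_iff.mpr hsw] at hx
        simp only [Bool.false_eq_true, if_false] at hx
        exact pv_scan_fst_pos s (p+1) true st hen (by omega) x hx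
    | false =>
      simp only [Bool.false_eq_true, if_false] at hx
      by_cases hsw : PySem.Chars.startswith (s.drop p) pvDoo = true
      · rw [hsw, if_pos rfl] at hx
        exact pv_scan_fst_pos s (p+1) true (p : Int) (fun _ => by exact_mod_cast hp) (by omega) x hx
      · rw [Bool.eq_false_iff.mpr hsw] at hx
        simp only [Bool.false_eq_true, if_false] at hx
        exact pv_scan_fst_pos s (p+1) false st hen (by omega) x hx
  · rw [if_neg hlt] at hx
    by_cases hc : en = true ∧ st < (s.length : Int)
    · rw [if_pos hc] at hx
      have : x = (st, (s.length : Int)) := by simpa using hx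
      rw [this]
      exact hen hc.1
    · rw [if_neg hc] at hx
      simp at hx
termination_by s.length - p

-- A's result as B's scan from position 1 (A's first find starts at index 1)
theorem pv_a_eq_scan_one (puzzle : String) (hn : 0 < puzzle.toList.length) :
    parse_do_donts puzzle = pvBScan puzzle.toList 1 true 0 := by
  have h := (pv_main puzzle.toList (puzzle.toList.length + 1)).1 0 [] hn (by omega)
  simp only [Nat.cast_zero, List.nil_append] at h
  unfold parse_do_donts
  exact h

-- ===== VERDICT (by name: the statement is the Claim_ definition above) =====
theorem parse_do_donts_spec : Claim_unchanged_parse_do_donts := by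
  intro puzzle _ hD
  by_cases hn : 0 < puzzle.toList.length
  · rw [pv_a_eq_scan_one puzzle hn, pv_alt_eq_scan]
    conv_rhs => rw [pvBScan]
    rw [if_pos hn, if_pos rfl]
    have hsw : PySem.Chars.startswith (puzzle.toList.drop 0) pvDont = false := by
      rw [Bool.eq_false_iff]
      intro h
      apply hD
      unfold D_parse_do_donts
      rw [PySem.Str.startswith_eq]
      simpa [pvDont] using h
    rw [hsw]
    simp
  · have hlen : puzzle.toList.length = 0 := by omega
    unfold parse_do_donts
    rw [pv_alt_eq_scan, hlen]
    rw [pvALoop, if_neg (by simp [hlen]), pvBScan]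
    simp [hlen]

theorem parse_do_donts_changed : Claim_changed_parse_do_donts := by
  unfold Claim_changed_parse_do_donts; decide

theorem parse_do_donts_tight : Claim_exact_parse_do_donts := by
  intro puzzle _ hD heq
  have hpre : pvDont <+: puzzle.toList := by
    unfold D_parse_do_donts at hD
    rw [PySem.Str.startswith_eq, PySem.Chars.startswith_iff] at hD
    simpa [pvDont] using hD
  have hn : 7 ≤ puzzle.toList.length := by
    have := hpre.length_le
    simpa [pvDont] using this
  obtain ⟨r, l, hhead⟩ := pv_scan_true_head puzzle.toList 1 0 (by norm_num) (by omega)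
  have hA : parse_do_donts puzzle = (0, r) :: l := by
    rw [pv_a_eq_scan_one puzzle (by omega)]; exact hhead
  have hB : parse_do_donts_alt puzzle = pvBScan puzzle.toList 1 false 0 := by
    rw [pv_alt_eq_scan, pvBScan, if_pos (by omega : 0 < puzzle.toList.length), if_pos rfl]
    have hsw : PySem.Chars.startswith (puzzle.toList.drop 0) pvDont = true := by
      rw [PySem.Chars.startswith_iff]; simpa using hpre
    rw [hsw, if_pos rfl]
    norm_num
  have hmem : ((0 : Int), r) ∈ pvBScan puzzle.toList 1 false 0 := by
    rw [← hB, ← heq, hA]; exact List.mem_cons_self ..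
  have := pv_scan_fst_pos puzzle.toList 1 false 0 (by simp) le_rfl _ hmem
  norm_num at this
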